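-- pv_equiv track=rewrite | github.com/jameskhedley/advent-of-code-solutions | 2025/day9.py | point_inside_border
-- ===== SOURCE A (Python) =====
-- def point_inside_border(point, border_points):
--     #draw a horizontal ray left and right until it reaches min and max values, counting how many lines it crosses
--     inside = None
--     if point in border_points:
--         return True
--     if ex:
--         max = 14
--     else:
--         max = 100000
--     xpos, ypos = int(point[0]), int(point[1])
--     lcount, rcount = 0,0
--     while xpos >= 0:
--         if (xpos,ypos) in border_points:
--             lcount+=1
--         xpos -= 1
--     xpos, ypos = int(point[0]), int(point[1])
--     while xpos < max:
--         if (xpos,ypos) in border_points: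
--             rcount+=1
--         xpos += 1
--     if lcount == 0 or rcount == 0:
--         inside = False #completely outside
--     elif lcount % 2 == 0 and rcount %2 == 0:
--         inside = False # in a gulf
--     else:
--         inside = True
--     return inside
--
-- ex=True
-- ===== SOURCE B (Python) =====
-- def point_inside_border(point, border_points):
--     # Ray-cast: collect the distinct border x-coordinates of the point's row in one
--     # pass, then count crossings on each side of the point (grid bound 14, as in A).
--     if point in border_points:
--         return True
--     x, y = int(point[0]), int(point[1])
--     xs = {b[0] for b in border_points if len(b) == 2 and b[1] == y}
--     lcount = sum(1 for t in xs if 0 <= t <= x)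
--     rcount = sum(1 for t in xs if x <= t < 14)
--     return lcount > 0 and rcount > 0 and not (lcount % 2 == 0 and rcount % 2 == 0)
-- ===== Notes on version B (the rewrite author's own statement) =====
-- stated objective: faster
-- what changed: A scans every integer x-position from the point down to 0 and again up to the grid bound 14 testing each position for membership in the border set; B makes a single pass over the border points collecting the distinct border x-coordinates of the point's row and counts the crossings on each side of the point directly from that set.
import Mathlib
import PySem

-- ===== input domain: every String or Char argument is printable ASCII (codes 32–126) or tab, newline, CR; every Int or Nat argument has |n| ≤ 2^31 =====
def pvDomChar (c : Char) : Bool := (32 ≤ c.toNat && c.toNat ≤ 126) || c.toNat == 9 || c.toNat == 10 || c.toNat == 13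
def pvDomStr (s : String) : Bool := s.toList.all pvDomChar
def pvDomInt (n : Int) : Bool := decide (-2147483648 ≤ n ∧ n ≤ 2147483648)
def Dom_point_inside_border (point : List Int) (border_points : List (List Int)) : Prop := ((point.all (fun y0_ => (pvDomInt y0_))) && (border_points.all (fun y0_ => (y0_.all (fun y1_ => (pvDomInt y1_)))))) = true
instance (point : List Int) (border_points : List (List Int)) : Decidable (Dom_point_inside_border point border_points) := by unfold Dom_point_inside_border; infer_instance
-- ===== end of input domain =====

-- B replaces A's scan over every integer x-position of the ray by one pass over the border
-- points, collecting the distinct border x-coordinates of the point's row and counting the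
-- crossings on each side of the point from that set.

-- ===== PORT A =====
-- `while xpos >= 0: if (xpos,ypos) in border_points: lcount+=1; xpos -= 1`
def loopLeft (xpos ypos : Int) (bp : List (List Int)) (lcount : Int) : Int :=
  if h : 0 ≤ xpos then
    loopLeft (xpos - 1) ypos bp (if bp.contains [xpos, ypos] then lcount + 1 else lcount)
  else lcount
termination_by (xpos + 1).toNat
decreasing_by omega

-- `while xpos < max: if (xpos,ypos) in border_points: rcount+=1; xpos += 1`
def loopRight (xpos ypos : Int) (bp : List (List Int)) (mx rcount : Int) : Int :=
  if h : xpos < mx then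
    loopRight (xpos + 1) ypos bp mx (if bp.contains [xpos, ypos] then rcount + 1 else rcount)
  else rcount
termination_by (mx - xpos).toNat
decreasing_by omega

def point_inside_border (point : List Int) (border_points : List (List Int)) : Bool :=
  if point ∈ border_points then true
  else
    -- ex = True, so max = 14
    match PySem.List.pyGet? point 0, PySem.List.pyGet? point 1 with
    | some xpos, some ypos =>
      let mx : Int := 14
      let lcount := loopLeft xpos ypos border_points 0
      let rcount := loopRight xpos ypos border_points mx 0
      if lcount == 0 || rcount == 0 then false
      else if lcount % 2 == 0 && rcount % 2 == 0 then false
      else true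
    | _, _ => false  -- IndexError in Python (len(point) < 2); excluded by Pre_

-- ===== PORT B =====
-- `{b[0] for b in border_points if len(b) == 2 and b[1] == y}` (set comprehension)
def rowXs (y : Int) (bp : List (List Int)) : PySem.Set Int :=
  PySem.Set.ofList (bp.filterMap (fun b =>
    match b with
    | [b0, b1] => if b1 = y then some b0 else none
    | _ => none))

def point_inside_border_alt (point : List Int) (border_points : List (List Int)) : Bool :=
  if point ∈ border_points then true
  else
    match PySem.List.pyGet? point 0 with
    | none => false  -- IndexError in Python (len(point) < 2); excluded by Pre_
    | some x =>
    match PySem.List.pyGet? point 1 with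
    | none => false  -- IndexError in Python (len(point) < 2); excluded by Pre_
    | some y =>
      let xs := rowXs y border_points
      -- sum(1 for t in xs if 0 <= t <= x) — a count over a set, order-independent
      let lcount : Int := (xs.countP (fun t => decide (0 ≤ t ∧ t ≤ x)) : Nat)
      let rcount : Int := (xs.countP (fun t => decide (x ≤ t ∧ t < 14)) : Nat)
      lcount > 0 && rcount > 0 && !(lcount % 2 == 0 && rcount % 2 == 0)

-- ===== PRECONDITION & SPEC =====
-- Pre_ excludes only the inputs on which the Python A raises IndexError:
-- a point of length < 2 that is not itself one of the border points.
def Pre_point_inside_border (point : List Int) (border_points : List (List Int)) : Prop :=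
  point ∈ border_points ∨ 2 ≤ point.length
instance (point : List Int) (border_points : List (List Int)) : Decidable (Pre_point_inside_border point border_points) := by unfold Pre_point_inside_border; infer_instance

def pvWitness_point_inside_border : List Int × List (List Int) := ([0, 0], [[0, 1]])

def Spec_point_inside_border (point : List Int) (border_points : List (List Int)) (out : Bool) : Prop := out = point_inside_border_alt point border_points
instance (point : List Int) (border_points : List (List Int)) (out : Bool) : Decidable (Spec_point_inside_border point border_points out) := by unfold Spec_point_inside_border; infer_instance

-- ===== CLAIM (what is proved, stated in full; the proofs are below) =====
def Claim_equal_point_inside_border : Prop := ∀ (point : List Int) (border_points : List (List Int)), Dom_point_inside_border point border_points → Pre_point_inside_border point border_points → Spec_point_inside_border point border_points (point_inside_border point border_points)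

-- ===== LEMMAS AND PROOFS =====

-- A's left scan counts the x-positions 0, …, xpos that are border cells of the row
theorem loopLeft_count_aux (n : Nat) : ∀ (xpos : Int), (xpos + 1).toNat ≤ n →
    ∀ (ypos : Int) (bp : List (List Int)) (c : Int), loopLeft xpos ypos bp c =
      c + ((PySem.List.pyRange 0 (xpos + 1) 1).countP (fun t => bp.contains [t, ypos]) : Nat) := by
  induction n with
  | zero =>
    intro xpos h ypos bp c
    rw [loopLeft]
    have hx : ¬ (0 ≤ xpos) := by omega
    rw [PySem.List.pyRange_one_eq_nil (by omega)]
    simp [hx]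
  | succ n ih =>
    intro xpos h ypos bp c
    rw [loopLeft]
    by_cases hx : 0 ≤ xpos
    · rw [dif_pos hx, ih (xpos - 1) (by omega),
        PySem.List.pyRange_one_append 0 xpos (xpos + 1) hx (by omega),
        PySem.List.pyRange_one_singleton, List.countP_append]
      have hc : xpos - 1 + 1 = xpos := by omega
      rw [hc]
      by_cases hb : bp.contains [xpos, ypos]
      · simp only [hb, if_pos, List.countP_cons, List.countP_nil]
        push_cast
        ring
      · simp only [hb, Bool.false_eq_true, if_false, List.countP_cons, List.countP_nil]
        push_cast
        ring
    · rw [dif_neg hx, PySem.List.pyRange_one_eq_nil (by omega)]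
      simp

theorem loopLeft_count (xpos ypos : Int) (bp : List (List Int)) :
    loopLeft xpos ypos bp 0 =
      ((PySem.List.pyRange 0 (xpos + 1) 1).countP (fun t => bp.contains [t, ypos]) : Nat) := by
  rw [loopLeft_count_aux (xpos + 1).toNat xpos le_rfl ypos bp 0, zero_add]

-- A's right scan counts the x-positions xpos, …, mx-1 that are border cells of the row
theorem loopRight_count_aux (n : Nat) : ∀ (xpos mx : Int), (mx - xpos).toNat ≤ n →
    ∀ (ypos : Int) (bp : List (List Int)) (c : Int), loopRight xpos ypos bp mx c =
      c + ((PySem.List.pyRange xpos mx 1).countP (fun t => bp.contains [t, ypos]) : Nat) := by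
  induction n with
  | zero =>
    intro xpos mx h ypos bp c
    rw [loopRight]
    have hx : ¬ (xpos < mx) := by omega
    rw [PySem.List.pyRange_one_eq_nil (by omega)]
    simp [hx]
  | succ n ih =>
    intro xpos mx h ypos bp c
    rw [loopRight]
    by_cases hx : xpos < mx
    · rw [dif_pos hx, ih (xpos + 1) mx (by omega),
        PySem.List.pyRange_one_cons hx, List.countP_cons]
      by_cases hb : bp.contains [xpos, ypos]
      · simp only [hb, if_pos]
        push_cast
        ring
      · simp only [hb, Bool.false_eq_true, if_false]
        push_cast
        ring
    · rw [dif_neg hx, PySem.List.pyRange_one_eq_nil (by omega)]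
      simp

theorem loopRight_count (xpos ypos : Int) (bp : List (List Int)) (mx : Int) :
    loopRight xpos ypos bp mx 0 =
      ((PySem.List.pyRange xpos mx 1).countP (fun t => bp.contains [t, ypos]) : Nat) := by
  rw [loopRight_count_aux (mx - xpos).toNat xpos mx le_rfl ypos bp 0, zero_add]

theorem mem_rowXs (y : Int) (bp : List (List Int)) (t : Int) :
    t ∈ rowXs y bp ↔ [t, y] ∈ bp := by
  unfold rowXs
  rw [PySem.Set.mem_ofList, List.mem_filterMap]
  constructor
  · rintro ⟨b, hb, hf⟩
    match b with
    | [] => simp at hf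
    | [b0] => simp at hf
    | [b0, b1] =>
      by_cases h1 : b1 = y
      · simp [h1] at hf; subst h1; subst hf; exact hb
      · simp [h1] at hf
    | b0 :: b1 :: b2 :: rest => simp at hf
  · intro h
    exact ⟨[t, y], h, by simp⟩

-- counting ray positions that are border cells = counting distinct row xs in the range
theorem count_bridge (bp : List (List Int)) (y a b : Int) (q : Int → Bool)
    (hq : ∀ t, q t = decide (a ≤ t ∧ t < b)) :
    ((PySem.List.pyRange a b 1).countP (fun t => bp.contains [t, y]))
      = (rowXs y bp).countP q := by
  rw [List.countP_eq_length_filter, List.countP_eq_length_filter]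
  have h1 : ((PySem.List.pyRange a b 1).filter (fun t => bp.contains [t, y])).Nodup :=
    (PySem.List.nodup_pyRange_one a b).filter _
  have h2 : ((rowXs y bp).filter q).Nodup := (PySem.Set.nodup_ofList _).filter _
  rw [← List.toFinset_card_of_nodup h1, ← List.toFinset_card_of_nodup h2]
  congr 1
  apply Finset.ext
  intro t
  simp only [List.mem_toFinset, List.mem_filter, PySem.List.mem_pyRange_one, hq,
    mem_rowXs, decide_eq_true_eq, List.contains_iff_mem]
  tauto

-- A's branch chain and B's boolean expression agree on any two counts
theorem bool_bridge (n m : Nat) :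
    (if (n : Int) == 0 || (m : Int) == 0 then false
     else if (n : Int) % 2 == 0 && (m : Int) % 2 == 0 then false
     else true)
      = ((n : Int) > 0 && (m : Int) > 0 && !((n : Int) % 2 == 0 && (m : Int) % 2 == 0)) := by
  by_cases h1 : (n : Int) = 0
  · simp [h1]
  by_cases h2 : (m : Int) = 0
  · simp [h2]
  have hn : (0 : Int) < n := by omega
  have hm : (0 : Int) < m := by omega
  simp only [hn, hm, decide_true, Bool.true_and]
  by_cases h3 : ((n : Int) % 2 == 0 && (m : Int) % 2 == 0)
  · simp [h3]
  · simp only [Bool.not_eq_true] at h3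
    simp [h3]
    omega

theorem point_inside_border_spec : Claim_equal_point_inside_border := by
  unfold Claim_equal_point_inside_border Spec_point_inside_border
  intro point bp _hdom hpre
  by_cases hmem : point ∈ bp
  · unfold point_inside_border point_inside_border_alt
    rw [if_pos hmem, if_pos hmem]
  · have hlen : 2 ≤ point.length := by
      rcases hpre with h | h
      · exact absurd h hmem
      · exact h
    match point, hlen with
    | p0 :: p1 :: rest, _ =>
      have hg0 : PySem.List.pyGet? (p0 :: p1 :: rest) 0 = some p0 := by simp
      have hg1 : PySem.List.pyGet? (p0 :: p1 :: rest) 1 = some p1 := by simp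
      have hl := count_bridge bp p1 0 (p0 + 1) (fun t => decide (0 ≤ t ∧ t ≤ p0))
        (by intro t; simp)
      have hr := count_bridge bp p1 p0 14 (fun t => decide (p0 ≤ t ∧ t < 14)) (fun t => rfl)
      unfold point_inside_border point_inside_border_alt
      rw [if_neg hmem, if_neg hmem, hg0, hg1]
      simp only [loopLeft_count, loopRight_count, hl, hr]
      exact bool_bridge _ _
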